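-- pv_equiv track=rewrite | github.com/overflow65537/MFW-PyQt6 | app/utils/release_notes.py | _safe_path_segment
-- ===== SOURCE A (Python) =====
-- def _safe_path_segment(value: str, fallback: str = "MFW_CFA") -> str:
--     """Return a single safe path segment (no traversal / separators)."""
--     text = str(value or "").strip().replace("\\", "/")
--     for ch in ('<', '>', ':', '"', "|", "?", "*"):
--         text = text.replace(ch, "_")
--
--     parts = [p for p in text.split("/") if p and p not in (".", "..")]
--     if not parts:
--         return fallback
--
--     sanitized = "_".join(parts).strip(" .")
--     return sanitized or fallback
-- ===== SOURCE B (Python) =====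
-- def _safe_path_segment(value: str, fallback: str = "MFW_CFA") -> str:
--     """Single pass: split on both separators while mapping unsafe chars, no replace chain."""
--     text = str(value or "").strip()
--     parts = []
--     cur = []
--     for ch in text:
--         if ch == "/" or ch == "\\":
--             seg = "".join(cur)
--             cur = []
--             if seg and seg not in (".", ".."):
--                 parts.append(seg)
--         elif ch in '<>:"|?*':
--             cur.append("_")
--         else:
--             cur.append(ch)
--     seg = "".join(cur)
--     if seg and seg not in (".", ".."):
--         parts.append(seg)
--     if not parts:
--         return fallback
--     sanitized = "_".join(parts).strip(" .")
--     return sanitized or fallback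
-- ===== Notes on version B (the rewrite author's own statement) =====
-- stated objective: alternative
-- what changed: Replaces the replace-chain (one full string rewrite per special character, then a split and a filter pass) by a single pass over the characters that maps unsafe characters and flushes segments at either separator.
import Mathlib
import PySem

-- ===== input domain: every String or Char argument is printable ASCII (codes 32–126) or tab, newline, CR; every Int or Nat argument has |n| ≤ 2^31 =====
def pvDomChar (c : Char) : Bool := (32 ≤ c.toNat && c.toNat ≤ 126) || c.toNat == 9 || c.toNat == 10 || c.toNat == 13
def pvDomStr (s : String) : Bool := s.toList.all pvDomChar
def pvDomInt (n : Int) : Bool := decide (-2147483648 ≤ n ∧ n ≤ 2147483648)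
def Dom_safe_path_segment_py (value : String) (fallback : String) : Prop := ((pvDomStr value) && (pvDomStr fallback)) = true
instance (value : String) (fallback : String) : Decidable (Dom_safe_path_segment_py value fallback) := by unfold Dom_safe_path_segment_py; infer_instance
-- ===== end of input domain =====

-- B replaces A's chain of full-string replace passes (then split + filter) by a single pass over the characters; objective: alternative.

-- shared predicate: Python's 'p and p not in (".", "..")'
def pvKeep (p : List Char) : Bool := !(p == []) && !(p == ['.']) && !(p == ['.', '.'])

-- ===== PORT A =====
def safe_path_segment_py (value : String) (fallback : String) : String :=
  -- text = str(value or "").strip().replace("\\", "/")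
  let text0 := (if value == "" then "" else value)
  let text1 := PySem.Chars.replace (PySem.Chars.strip text0.toList) ['\\'] ['/']
  -- for ch in ('<','>',':','"','|','?','*'): text = text.replace(ch, "_")
  let text := List.foldl (fun t ch => PySem.Chars.replace t [ch] ['_']) text1
      ['<', '>', ':', '"', '|', '?', '*']
  -- parts = [p for p in text.split("/") if p and p not in (".", "..")]
  let parts := (PySem.Chars.splitOn text ['/']).filter pvKeep
  if parts == [] then fallback
  else
    -- sanitized = "_".join(parts).strip(" .")
    let sanitized := PySem.Chars.stripChars (PySem.Chars.join ['_'] parts) [' ', '.']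
    if sanitized == [] then fallback else String.mk sanitized

-- ===== PORT B =====
-- Source B's elif branch: map an unsafe character to '_', keep any other character
def pvMapB (c : Char) : Char :=
  if c == '<' || c == '>' || c == ':' || c == '"' || c == '|' || c == '?' || c == '*' then '_' else c

-- Source B's loop over the characters: current segment 'cur', collected 'parts'; the [] case is the post-loop flush
def pvGoB : List Char → List Char → List (List Char) → List (List Char)
  | [], cur, parts => parts ++ (if pvKeep cur then [cur] else [])
  | c :: t, cur, parts =>
    if c == '/' || c == '\\' then pvGoB t [] (parts ++ (if pvKeep cur then [cur] else []))
    else pvGoB t (cur ++ [pvMapB c]) parts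

def safe_path_segment_py_alt (value : String) (fallback : String) : String :=
  -- text = str(value or "").strip()
  let text := PySem.Chars.strip (if value == "" then "" else value).toList
  let parts := pvGoB text [] []
  if parts == [] then fallback
  else
    -- sanitized = "_".join(parts).strip(" .")
    let sanitized := PySem.Chars.stripChars (PySem.Chars.join ['_'] parts) [' ', '.']
    if sanitized == [] then fallback else String.mk sanitized

-- ===== PRECONDITION & SPEC =====
def Spec_safe_path_segment_py (value : String) (fallback : String) (out : String) : Prop := out = safe_path_segment_py_alt value fallback
instance (value : String) (fallback : String) (out : String) : Decidable (Spec_safe_path_segment_py value fallback out) := by unfold Spec_safe_path_segment_py; infer_instance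

-- ===== CLAIM (what is proved, stated in full; the proofs are below) =====
def Claim_equal_safe_path_segment_py : Prop := ∀ (value : String) (fallback : String), Dom_safe_path_segment_py value fallback → Spec_safe_path_segment_py value fallback (safe_path_segment_py value fallback)

-- ===== LEMMAS AND PROOFS =====

-- the composite effect of A's eight single-character replace passes
def pvG (c : Char) : Char :=
  if c == '\\' then '/'
  else if c == '<' || c == '>' || c == ':' || c == '"' || c == '|' || c == '?' || c == '*' then '_' else c

-- one single-character replacement pass, as a function on one character
def pvR (a b : Char) (c : Char) : Char := if c == a then b else c

theorem pvReplace_go_succ_cons (a b c : Char) (f : Nat) (t acc : List Char) :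
    PySem.Chars.replace.go [a] [b] (f+1) (c :: t) acc
      = if List.isPrefixOf [a] (c :: t) then
          PySem.Chars.replace.go [a] [b] f (List.drop 1 (c :: t)) ([b].reverse ++ acc)
        else PySem.Chars.replace.go [a] [b] f t (c :: acc) := rfl

theorem pvReplace_go_nil (a b : Char) (f : Nat) (acc : List Char) :
    PySem.Chars.replace.go [a] [b] f [] acc = acc.reverse := by
  cases f with
  | zero => show acc.reverse ++ [] = acc.reverse; simp
  | succ f => rfl

-- single-character replace is a map
theorem pvReplace_go_single (a b : Char) :
    ∀ (l : List Char) (fuel : Nat) (acc : List Char), l.length ≤ fuel →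
      PySem.Chars.replace.go [a] [b] fuel l acc = acc.reverse ++ l.map (pvR a b) := by
  intro l
  induction l with
  | nil => intro fuel acc h; simp [pvReplace_go_nil]
  | cons c t ih =>
    intro fuel acc h
    cases fuel with
    | zero => simp at h
    | succ f =>
      rw [pvReplace_go_succ_cons]
      by_cases hc : a = c
      · subst hc
        have hpre : List.isPrefixOf [a] (a :: t) = true := by simp [List.isPrefixOf]
        rw [hpre]
        simp only [if_true, List.drop_one, List.tail_cons, List.reverse_singleton,
          List.singleton_append]
        rw [ih f (b :: acc) (by simpa using h)]
        simp [pvR]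
      · have hpre : List.isPrefixOf [a] (c :: t) = false := by
          simp [List.isPrefixOf]; exact hc
        rw [hpre]
        simp only [Bool.false_eq_true, if_false]
        rw [ih f (c :: acc) (by simpa using h)]
        simp [pvR]
        exact fun h' => absurd h'.symm hc

theorem pvReplace_single (a b : Char) (l : List Char) :
    PySem.Chars.replace l [a] [b] = l.map (pvR a b) := by
  show (if List.isEmpty [a] = true then _ else PySem.Chars.replace.go [a] [b] l.length l []) = _
  simp only [List.isEmpty_cons, Bool.false_eq_true, if_false]
  rw [pvReplace_go_single a b l l.length [] le_rfl]
  simp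

-- split on "/" as a plain structural recursion
def pvSp : List Char → List Char → List (List Char)
  | [], cur => [cur]
  | c :: t, cur => if c == '/' then cur :: pvSp t [] else pvSp t (cur ++ [c])

theorem pvSplitOn_go_succ_cons (s c : Char) (f : Nat) (t cur : List Char) (acc : List (List Char)) :
    PySem.Chars.splitOn.go [s] (f+1) (c :: t) cur acc
      = if List.isPrefixOf [s] (c :: t) then
          PySem.Chars.splitOn.go [s] f (List.drop 1 (c :: t)) [] (cur.reverse :: acc)
        else PySem.Chars.splitOn.go [s] f t (c :: cur) acc := rfl

theorem pvSplitOn_go_nil (s : Char) (f : Nat) (cur : List Char) (acc : List (List Char)) :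
    PySem.Chars.splitOn.go [s] f [] cur acc = (cur.reverse :: acc).reverse := by
  cases f with
  | zero => show ((cur.reverse ++ []) :: acc).reverse = (cur.reverse :: acc).reverse; simp
  | succ f => rfl

theorem pvSplitOn_go_sp :
    ∀ (l : List Char) (fuel : Nat) (rcur : List Char) (acc : List (List Char)),
      l.length ≤ fuel →
      PySem.Chars.splitOn.go ['/'] fuel l rcur acc = acc.reverse ++ pvSp l rcur.reverse := by
  intro l
  induction l with
  | nil => intro fuel rcur acc h; simp [pvSplitOn_go_nil, pvSp]
  | cons c t ih =>
    intro fuel rcur acc h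
    cases fuel with
    | zero => simp at h
    | succ f =>
      rw [pvSplitOn_go_succ_cons]
      by_cases hc : c = '/'
      · subst hc
        have hpre : List.isPrefixOf ['/'] ('/' :: t) = true := by simp [List.isPrefixOf]
        rw [hpre]
        simp only [if_true, List.drop_one, List.tail_cons]
        rw [ih f [] (rcur.reverse :: acc) (by simpa using h)]
        simp [pvSp]
      · have hpre : List.isPrefixOf ['/'] (c :: t) = false := by
          simp [List.isPrefixOf]; exact fun h' => hc h'.symm
        rw [hpre]
        simp only [Bool.false_eq_true, if_false]
        rw [ih f (c :: rcur) acc (by simpa using h)]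
        have hcc : (c == '/') = false := by simp [beq_iff_eq]; exact hc
        simp [pvSp, hcc]

theorem pvSplitOn_slash (l : List Char) :
    PySem.Chars.splitOn l ['/'] = pvSp l [] := by
  show PySem.Chars.splitOn.go ['/'] (l.length + 1) l [] [] = pvSp l []
  rw [pvSplitOn_go_sp l (l.length + 1) [] [] (by omega)]
  simp

-- the composite of A's replaces equals pvG pointwise
theorem pvComp_eq (c : Char) :
    pvR '*' '_' (pvR '?' '_' (pvR '|' '_' (pvR '"' '_' (pvR ':' '_' (pvR '>' '_'
      (pvR '<' '_' (pvR '\\' '/' c))))))) = pvG c := by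
  by_cases h0 : c = '\\'; · subst h0; rfl
  by_cases h1 : c = '<'; · subst h1; rfl
  by_cases h2 : c = '>'; · subst h2; rfl
  by_cases h3 : c = ':'; · subst h3; rfl
  by_cases h4 : c = '"'; · subst h4; rfl
  by_cases h5 : c = '|'; · subst h5; rfl
  by_cases h6 : c = '?'; · subst h6; rfl
  by_cases h7 : c = '*'; · subst h7; rfl
  simp [pvR, pvG, h0, h1, h2, h3, h4, h5, h6, h7]

-- A's replace chain is one map with pvG
theorem pvReplaceChain (tl : List Char) :
    List.foldl (fun t ch => PySem.Chars.replace t [ch] ['_'])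
      (PySem.Chars.replace tl ['\\'] ['/']) ['<', '>', ':', '"', '|', '?', '*']
      = tl.map pvG := by
  simp only [List.foldl_cons, List.foldl_nil]
  rw [pvReplace_single, pvReplace_single, pvReplace_single, pvReplace_single, pvReplace_single,
    pvReplace_single, pvReplace_single, pvReplace_single]
  induction tl with
  | nil => simp
  | cons c t ih =>
    simp only [List.map_cons]
    rw [ih, pvComp_eq]

-- B's segment collector in flush form
def pvSegs : List Char → List Char → List (List Char)
  | [], cur => if pvKeep cur then [cur] else []
  | c :: t, cur =>
    if c == '/' || c == '\\' then (if pvKeep cur then [cur] else []) ++ pvSegs t []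
    else pvSegs t (cur ++ [pvMapB c])

theorem pvGoB_eq_segs : ∀ (l cur : List Char) (parts : List (List Char)),
    pvGoB l cur parts = parts ++ pvSegs l cur := by
  intro l
  induction l with
  | nil => intro cur parts; simp [pvGoB, pvSegs]
  | cons c t ih =>
    intro cur parts
    by_cases hc : (c == '/' || c == '\\') = true
    · simp [pvGoB, pvSegs, hc, ih]
    · simp [pvGoB, pvSegs, hc, ih]

theorem pvBridge : ∀ (l cur : List Char),
    List.filter pvKeep (pvSp (l.map pvG) cur) = pvSegs l cur := by
  intro l
  induction l with
  | nil => intro cur; simp [pvSp, pvSegs, List.filter_cons]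
  | cons c t ih =>
    intro cur
    by_cases hsep : (c == '/' || c == '\\') = true
    · have hg : pvG c = '/' := by
        have h' : c = '/' ∨ c = '\\' := by simpa using hsep
        rcases h' with h | h <;> (subst h; rfl)
      simp only [List.map_cons, pvSp, hg, BEq.rfl, if_true, List.filter_cons, pvSegs, hsep]
      by_cases hk : pvKeep cur = true
      · simp [hk, ih]
      · simp [hk, ih]
    · have hprop : ¬(c = '/' ∨ c = '\\') := by simpa using hsep
      have hc1 : (c == '/') = false := by
        simp only [beq_eq_false_iff_ne, ne_eq]; exact fun h => hprop (Or.inl h)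
      have hc2 : (c == '\\') = false := by
        simp only [beq_eq_false_iff_ne, ne_eq]; exact fun h => hprop (Or.inr h)
      have hsepf : (c == '/' || c == '\\') = false := by simp [hc1, hc2]
      have hg : pvG c = pvMapB c := by simp [pvG, pvMapB, hc2]
      have hgn : (pvMapB c == '/') = false := by
        simp only [pvMapB]
        by_cases hs : (c == '<' || c == '>' || c == ':' || c == '"' || c == '|' || c == '?' || c == '*') = true
        · rw [if_pos hs]; rfl
        · rw [if_neg hs]; exact hc1
      simp only [List.map_cons, pvSp, hg, hgn, Bool.false_eq_true, if_false, pvSegs, hsepf]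
      exact ih (cur ++ [pvMapB c])

-- ===== VERDICT (by name: the statement is the Claim_ definition above) =====
theorem safe_path_segment_py_spec : Claim_equal_safe_path_segment_py := by
  intro value fallback _
  unfold Spec_safe_path_segment_py
  simp only [safe_path_segment_py, safe_path_segment_py_alt]
  have hparts :
      (PySem.Chars.splitOn
          (List.foldl (fun t ch => PySem.Chars.replace t [ch] ['_'])
            (PySem.Chars.replace (PySem.Chars.strip (if value == "" then "" else value).toList) ['\\'] ['/'])
            ['<', '>', ':', '"', '|', '?', '*']) ['/']).filter pvKeep
        = pvGoB (PySem.Chars.strip (if value == "" then "" else value).toList) [] [] := by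
    rw [pvReplaceChain, pvSplitOn_slash, pvBridge, pvGoB_eq_segs]
    simp
  rw [hparts]
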